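-- pv_equiv track=rewrite | github.com/zebben/mirror-gold-docs | scripts/wiki_trainers.py | assign_form_indexes
-- ===== SOURCE A (Python) =====
-- from collections import defaultdict, deque
--
-- def assign_form_indexes(species_list, form_species):
--     # Group by base species prefix
--     form_groups = defaultdict(list)
--
--     for species in species_list:
--         if species in form_species:
--             base = form_species[species]
--             form_groups[base].append(species)
--         else:
--             form_groups[species].append(species)
--
--
--     # Assign form indexes and return the final dict
--     form_dict = {}
--     for base, forms in form_groups.items():
--         for idx, form in enumerate(forms, start=0):
--             form_dict[(base, idx)] = form
--     return form_dict
-- ===== SOURCE B (Python) =====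
-- def assign_form_indexes(species_list, form_species):
--     # Different decomposition: compute each species' base once, then walk the
--     # distinct bases in first-occurrence order, collecting each base's members
--     # by filtering; no intermediate grouping dict is built.
--     bases = [form_species.get(s, s) for s in species_list]
--     out = {}
--     for base in dict.fromkeys(bases):
--         members = [s for b, s in zip(bases, species_list) if b == base]
--         for idx, s in enumerate(members):
--             out[(base, idx)] = s
--     return out
-- ===== Notes on version B (the rewrite author's own statement) =====
-- stated objective: alternative
-- what changed: B drops A's defaultdict grouping pass: it computes each species' base once into a list, then walks the distinct bases in first-occurrence order and collects each base's members by filtering the zipped (base, species) list before enumerating them.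
import Mathlib
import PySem

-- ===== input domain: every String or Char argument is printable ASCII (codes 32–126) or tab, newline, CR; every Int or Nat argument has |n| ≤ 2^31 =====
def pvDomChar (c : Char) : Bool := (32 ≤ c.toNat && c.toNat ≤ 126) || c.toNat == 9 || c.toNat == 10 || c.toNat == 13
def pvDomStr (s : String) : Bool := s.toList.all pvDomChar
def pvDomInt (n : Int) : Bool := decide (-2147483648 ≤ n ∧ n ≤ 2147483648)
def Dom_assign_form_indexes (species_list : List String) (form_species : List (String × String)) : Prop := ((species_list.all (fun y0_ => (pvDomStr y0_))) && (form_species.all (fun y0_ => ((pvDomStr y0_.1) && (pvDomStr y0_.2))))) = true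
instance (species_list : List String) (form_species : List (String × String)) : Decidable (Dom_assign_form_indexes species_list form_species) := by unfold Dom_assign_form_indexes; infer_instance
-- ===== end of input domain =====

-- B replaces A's grouping-dict pass by a base-list + dedup + per-base filter decomposition (alternative, same output, no speed claim).

-- ===== PORT A =====
def assign_form_indexes (species_list : List String) (form_species : List (String × String)) : List (String × Int × String) :=
  let fsd := PySem.Dict.ofList form_species
  -- Group by base species prefix (defaultdict(list))
  let form_groups :=
    species_list.foldl (fun d species =>
      if fsd.contains species then
        d.modify (fsd.getD species "") [] (fun g => g ++ [species])
      else
        d.modify species [] (fun g => g ++ [species]))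
      (PySem.Dict.empty : PySem.Dict String (List String))
  -- Assign form indexes and return the final dict
  let form_dict :=
    form_groups.items.foldl (fun fd p =>
      (PySem.List.enumerate p.2 0).foldl (fun fd q => fd.insert (p.1, q.1) q.2) fd)
      (PySem.Dict.empty : PySem.Dict (String × Int) String)
  form_dict.items.map (fun p => (p.1.1, p.1.2, p.2))

-- ===== PORT B =====
def assign_form_indexes_alt (species_list : List String) (form_species : List (String × String)) : List (String × Int × String) :=
  let fsd := PySem.Dict.ofList form_species
  let bases := species_list.map (fun s => fsd.getD s s)
  let out :=
    (PySem.List.dedup bases).foldl (fun d base =>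
      let members := ((bases.zip species_list).filter (fun p => p.1 == base)).map (fun p => p.2)
      (PySem.List.enumerate members 0).foldl (fun d q => d.insert (base, q.1) q.2) d)
      (PySem.Dict.empty : PySem.Dict (String × Int) String)
  out.items.map (fun p => (p.1.1, p.1.2, p.2))

-- ===== PRECONDITION & SPEC =====
def Spec_assign_form_indexes (species_list : List String) (form_species : List (String × String)) (out : List (String × Int × String)) : Prop := out = assign_form_indexes_alt species_list form_species
instance (species_list : List String) (form_species : List (String × String)) (out : List (String × Int × String)) : Decidable (Spec_assign_form_indexes species_list form_species out) := by unfold Spec_assign_form_indexes; infer_instance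

-- ===== CLAIM (what is proved, stated in full; the proofs are below) =====
def Claim_equal_assign_form_indexes : Prop := ∀ (species_list : List String) (form_species : List (String × String)), Dom_assign_form_indexes species_list form_species → Spec_assign_form_indexes species_list form_species (assign_form_indexes species_list form_species)

-- ===== LEMMAS AND PROOFS =====

-- zipping a mapped list with its source pairs each element with its image
theorem pv_zip_map_self {α β : Type} (f : α → β) (l : List α) :
    (l.map f).zip l = l.map (fun x => (f x, x)) := by
  induction l with
  | nil => simp
  | cons x xs ih => simpa using ih

-- A's membership/lookup branch computes exactly `fsd.getD s s`.
theorem pv_branch_eq (fsd : PySem.Dict String String) (d : PySem.Dict String (List String)) (s : String) :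
    (if fsd.contains s then d.modify (fsd.getD s "") [] (fun g => g ++ [s])
     else d.modify s [] (fun g => g ++ [s]))
      = d.modify (fsd.getD s s) [] (fun g => g ++ [s]) := by
  by_cases h : fsd.contains s = true
  · rw [PySem.Dict.contains_eq_isSome_get?] at h
    cases hg : fsd.get? s with
    | none => simp [hg] at h
    | some v =>
      simp [PySem.Dict.contains_eq_isSome_get?, hg, PySem.Dict.getD_eq_get?_getD]
  · have h' : fsd.contains s = false := by simpa using h
    simp [h', PySem.Dict.getD_of_not_contains fsd _ h']

-- A's grouping dict, listed as items, is: for each distinct base in first-occurrence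
-- order, the pair (base, species of that base in order).
theorem pv_groups_items (species_list : List String) (fsd : PySem.Dict String String) :
    (species_list.foldl (fun d species =>
        if fsd.contains species then
          d.modify (fsd.getD species "") [] (fun g => g ++ [species])
        else
          d.modify species [] (fun g => g ++ [species]))
      (PySem.Dict.empty : PySem.Dict String (List String))).items
    = (PySem.Set.ofList (species_list.map (fun s => fsd.getD s s))).map
        (fun b => (b, (((species_list.map (fun s => fsd.getD s s)).zip species_list).filter
            (fun p => p.1 == b)).map (fun p => p.2))) := by
  simp only [pv_branch_eq]
  -- rewrite the fold over species as a fold over (base, species) pairs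
  have hfold : ∀ (d0 : PySem.Dict String (List String)),
      species_list.foldl (fun d s => d.modify (fsd.getD s s) [] (fun g => g ++ [s])) d0
        = (species_list.map (fun s => (fsd.getD s s, s))).foldl
            (fun d p => d.modify p.1 [] (fun g => g ++ [p.2])) d0 := by
    intro d0; rw [List.foldl_map]
  rw [hfold]
  set l := species_list.map (fun s => (fsd.getD s s, s)) with hl
  have hnd : ((l.foldl (fun d p => d.modify p.1 [] (fun g => g ++ [p.2]))
      (PySem.Dict.empty : PySem.Dict String (List String)))).keys.Nodup := by
    have := PySem.Dict.nodup_keys_foldl_modify_key l (fun p => p.1) []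
      (fun d p => fun g => g ++ [p.2]) (PySem.Dict.empty : PySem.Dict String (List String))
      (by simp [PySem.Dict.keys_empty])
    simpa using this
  rw [PySem.Dict.items_eq_map_keys _ hnd []]
  have hkeys : ((l.foldl (fun d p => d.modify p.1 [] (fun g => g ++ [p.2]))
      (PySem.Dict.empty : PySem.Dict String (List String)))).keys
        = PySem.Set.ofList (species_list.map (fun s => fsd.getD s s)) := by
    have := PySem.Dict.keys_foldl_modify_key l (fun p => p.1) []
      (fun d p => fun g => g ++ [p.2]) (PySem.Dict.empty : PySem.Dict String (List String))
    simp only [PySem.Dict.keys_empty] at this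
    simpa [hl, PySem.Set.update, PySem.Set.ofList, List.map_map, Function.comp] using this
  rw [hkeys]
  apply List.map_congr_left
  intro b _
  have hg := PySem.Dict.getD_foldl_modify_append l
    (PySem.Dict.empty : PySem.Dict String (List String)) b
  simp only [PySem.Dict.getD_empty] at hg
  rw [hg]
  rw [pv_zip_map_self, hl]
  simp

-- ===== VERDICT (by name: the statement is the Claim_ definition above) =====
theorem assign_form_indexes_spec : Claim_equal_assign_form_indexes := by
  intro species_list form_species _
  unfold Spec_assign_form_indexes assign_form_indexes assign_form_indexes_alt
  simp only []
  rw [pv_groups_items]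
  rw [PySem.List.dedup_eq_ofList, List.foldl_map]
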